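-- pv_equiv track=rewrite | github.com/jasminenoack/rl-tic-tac-toe | agent/agent.py | get_canonical_form
-- ===== SOURCE A (Python) =====
-- def _transform(r, c, transform_id):
--     # apply flip
--     if transform_id >= 4:
--         c = 2 - c
--     # apply rotation
--     rotations = transform_id % 4
--     for _ in range(rotations):
--         r, c = c, 2 - r
--     return r, c
--
-- def transform_board(board, transform_id):
--     new_board = [None] * 9
--     for i in range(9):
--         r, c = i // 3, i % 3
--         tr, tc = _transform(r, c, transform_id)
--         new_board[tr * 3 + tc] = board[i]
--     return new_board
--
-- def get_canonical_form(board: list):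
--     """
--     Finds the canonical representation of a board state.
--     Returns the canonical board and the transform_id that creates it.
--     """
--     symmetries = []
--     for i in range(8):
--         symmetries.append(transform_board(board, i))
--
--     # Use the string representation to find the lexicographically smallest board
--     # We replace None with '.' to make sorting work consistently
--     canonical_board_str = min("".join(x or '.' for x in b) for b in symmetries)
--
--     # Find the transform_id that produced this canonical board
--     transform_id = 0 # Default to 0
--     canonical_board = symmetries[0]
--     for i in range(8):
--         b_str = "".join(x or '.' for x in symmetries[i])
--         if b_str == canonical_board_str:
--             transform_id = i
--             canonical_board = symmetries[i]
--             break
--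
--     return canonical_board, transform_id
-- ===== SOURCE B (Python) =====
-- _ROT = [2, 5, 8, 1, 4, 7, 0, 3, 6]   # rotate 90deg: cell src moves to _ROT[src]
-- _FLIP = [2, 1, 0, 5, 4, 3, 8, 7, 6]  # mirror columns: cell src moves to _FLIP[src]
--
--
-- def _permute(b, perm):
--     nb = [None] * 9
--     for src in range(9):
--         nb[perm[src]] = b[src]
--     return nb
--
--
-- def _board_str(b):
--     return "".join(x or '.' for x in b)
--
--
-- def get_canonical_form(board: list):
--     """Generate the 8 symmetries by group composition: the identity copy and its
--     mirror, each rotated three more times by one fixed index permutation, keeping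
--     a running lexicographic best (strict '<' keeps the lowest transform id)."""
--     ident = [board[i] for i in range(9)]
--     best_s = None
--     best_board, best_id = None, 0
--     for start, b in ((0, ident), (4, _permute(ident, _FLIP))):
--         for k in range(4):
--             s = _board_str(b)
--             if best_s is None or s < best_s:
--                 best_s, best_board, best_id = s, b, start + k
--             b = _permute(b, _ROT)
--     return best_board, best_id
-- ===== Notes on version B (the rewrite author's own statement) =====
-- stated objective: alternative
-- what changed: Instead of computing each of the 8 symmetries independently from the coordinate formula (flip then k rotations per cell) and then taking min over strings plus a second rescan for the index, B generates the symmetries by group composition - an identity copy and its column-mirror, each advanced by repeatedly applying one fixed 9-entry rotation permutation table - while a single running lexicographic best (strict '<') replaces the min+rescan.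
import Mathlib
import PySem

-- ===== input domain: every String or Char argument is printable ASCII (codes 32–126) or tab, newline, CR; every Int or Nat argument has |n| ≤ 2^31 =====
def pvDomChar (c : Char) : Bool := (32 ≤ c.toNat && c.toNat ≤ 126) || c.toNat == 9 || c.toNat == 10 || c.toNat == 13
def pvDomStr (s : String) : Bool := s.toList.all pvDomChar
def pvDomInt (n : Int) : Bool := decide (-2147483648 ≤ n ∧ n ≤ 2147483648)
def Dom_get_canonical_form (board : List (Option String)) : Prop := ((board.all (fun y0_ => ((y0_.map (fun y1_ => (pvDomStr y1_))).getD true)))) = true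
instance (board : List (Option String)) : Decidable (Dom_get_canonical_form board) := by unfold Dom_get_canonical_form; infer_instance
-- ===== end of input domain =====

-- B generates the 8 symmetries by group composition (identity copy and its mirror, each
-- advanced by one fixed rotation permutation table) with a single running lexicographic
-- best, instead of A's per-cell transform formula + min over strings + rescan for the index.

-- ===== PORT A =====
-- "".join(x or '.' for x in b)  — None and '' both render as '.'
def pvJoin (b : List (Option String)) : String :=
  PySem.Str.join "" (b.map (fun x => match x with | some s => if s = "" then "." else s | none => "."))

-- _transform(r, c, transform_id)
def pvTransform (r c tid : Int) : Int × Int :=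
  let c := if tid ≥ 4 then 2 - c else c
  (PySem.List.pyRange 0 (PySem.Int.mod tid 4) 1).foldl (fun rc _ => (rc.2, 2 - rc.1)) (r, c)

-- transform_board(board, transform_id); board[i] via pyGet? (the getD none default is
-- unreachable under Pre_: i < 9 ≤ board.length); new_board[tr*3+tc] = … via pySetD, exact
-- here since 0 ≤ tr*3+tc < 9 for every transform of a cell; symmetries[i] in the search
-- loop below via pyGetD (always in range: 8 symmetries, i in range(8))
def pvTransformBoard (board : List (Option String)) (tid : Int) : List (Option String) :=
  (PySem.List.pyRange 0 9 1).foldl (fun nb i =>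
    let r := PySem.Int.floordiv i 3
    let c := PySem.Int.mod i 3
    let trc := pvTransform r c tid
    PySem.List.pySetD nb (trc.1 * 3 + trc.2) ((PySem.List.pyGet? board i).getD none))
    (List.replicate 9 none)

-- A's final 'for i in range(8): … break' loop: first index whose string equals the target
def pvFindLoop (syms : List (List (Option String))) (target : String) :
    List Int → List (Option String) × Int → List (Option String) × Int
  | [], acc => acc
  | i :: rest, acc =>
      let b := PySem.List.pyGetD syms i []
      if pvJoin b = target then (b, i) else pvFindLoop syms target rest acc

def get_canonical_form (board : List (Option String)) : List (Option String) × Int :=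
  let symmetries := (PySem.List.pyRange 0 8 1).foldl
    (fun acc i => acc ++ [pvTransformBoard board i]) []
  -- min(...) over the 8 strings; the generator is never empty, so the getD "" is unreachable
  let canonical_board_str :=
    (PySem.List.min? (symmetries.map pvJoin) (fun s => s)).getD ""
  -- defaults transform_id = 0, canonical_board = symmetries[0]
  pvFindLoop symmetries canonical_board_str (PySem.List.pyRange 0 8 1)
    (PySem.List.pyGetD symmetries 0 [], 0)

-- ===== PORT B =====
def pvRotPerm : List Int := [2, 5, 8, 1, 4, 7, 0, 3, 6]
def pvFlipPerm : List Int := [2, 1, 0, 5, 4, 3, 8, 7, 6]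

-- _board_str(b)
def pvAltStr (b : List (Option String)) : String :=
  PySem.Str.join "" (b.map (fun x => match x with | some s => if s = "" then "." else s | none => "."))

-- _permute(b, perm): nb[perm[src]] = b[src]; perm entries are literal in-range indices
-- (pySetD exact), b[src] via pyGet? for src in range(9)
def pvPermute (b : List (Option String)) (perm : List Int) : List (Option String) :=
  (PySem.List.pyRange 0 9 1).foldl (fun nb src =>
    PySem.List.pySetD nb (PySem.List.pyGetD perm src 0) ((PySem.List.pyGet? b src).getD none))
    (List.replicate 9 none)

-- body of the inner 'for k in range(4)' loop: update the running best at id start+k,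
-- then rotate b by the fixed permutation; state = ((best_s, best_board, best_id), b)
def pvAltInnerStep (start : Int)
    (p : (Option String × List (Option String) × Int) × List (Option String)) (k : Int) :
    (Option String × List (Option String) × Int) × List (Option String) :=
  let s := pvAltStr p.2
  let st' := match p.1.1 with
    | none => (some s, p.2, start + k)
    | some bs => if s < bs then (some s, p.2, start + k) else p.1
  (st', pvPermute p.2 pvRotPerm)

def pvAltHalf (st : Option String × List (Option String) × Int) (start : Int)
    (b0 : List (Option String)) : Option String × List (Option String) × Int :=
  ((PySem.List.pyRange 0 4 1).foldl (pvAltInnerStep start) (st, b0)).1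

-- outer 'for start, b in ((0, ident), (4, _permute(ident, _FLIP)))' unrolled (2 literal pairs)
def get_canonical_form_alt (board : List (Option String)) : List (Option String) × Int :=
  let ident := (PySem.List.pyRange 0 9 1).foldl
    (fun acc i => acc ++ [(PySem.List.pyGet? board i).getD none]) []
  let st := pvAltHalf (none, [], 0) 0 ident
  let st := pvAltHalf st 4 (pvPermute ident pvFlipPerm)
  (st.2.1, st.2.2)

-- ===== PRECONDITION & SPEC =====
-- Pre_: boards with fewer than 9 cells make A's board[i] raise IndexError
def Pre_get_canonical_form (board : List (Option String)) : Prop := 9 ≤ board.length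
instance (board : List (Option String)) : Decidable (Pre_get_canonical_form board) := by
  unfold Pre_get_canonical_form; infer_instance

def pvWitness_get_canonical_form : List (Option String) :=
  [some "X", none, some "O", none, some "X", none, none, none, some "O"]

def Spec_get_canonical_form (board : List (Option String)) (out : List (Option String) × Int) : Prop := out = get_canonical_form_alt board
instance (board : List (Option String)) (out : List (Option String) × Int) : Decidable (Spec_get_canonical_form board out) := by unfold Spec_get_canonical_form; infer_instance

-- ===== CLAIM (what is proved, stated in full; the proofs are below) =====
def Claim_equal_get_canonical_form : Prop := ∀ (board : List (Option String)), Dom_get_canonical_form board → Pre_get_canonical_form board → Spec_get_canonical_form board (get_canonical_form board)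

-- ===== LEMMAS AND PROOFS =====

-- proof-side running-best fold over (board, id) pairs
def pvRunB (st : String × List (Option String) × Int) :
    List (List (Option String) × Int) → String × List (Option String) × Int
  | [] => st
  | p :: rest =>
      pvRunB (if pvJoin p.1 < st.1 then (pvJoin p.1, p.1, p.2) else st) rest

-- proof-side form of A's search loop, over the same pairs
def pvFindC (target : String) (d : List (Option String) × Int) :
    List (List (Option String) × Int) → List (Option String) × Int
  | [] => d
  | p :: rest => if pvJoin p.1 = target then (p.1, p.2) else pvFindC target d rest

-- the boards generated by B's inner loop, paired with their transform ids
def pvGen (start : Int) : List Int → List (Option String) → List (List (Option String) × Int)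
  | [], _ => []
  | k :: ks, b => (b, start + k) :: pvGen start ks (pvPermute b pvRotPerm)

-- A's index loop is the pair-list search over the boards the indices fetch
theorem pvFindLoop_eq (syms : List (List (Option String))) (t : String)
    (d : List (Option String) × Int) :
    ∀ idxs : List Int, pvFindLoop syms t idxs d
      = pvFindC t d (idxs.map fun i => (PySem.List.pyGetD syms i [], i)) := by
  intro idxs
  induction idxs with
  | nil => rfl
  | cons i rest ih => simp only [pvFindLoop, pvFindC, List.map_cons, ih]

-- the first element whose string equals the minimum IS the strict running best
theorem pvMain (l : List (List (Option String) × Int)) :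
    ∀ (e : List (Option String) × Int) (d : List (Option String) × Int),
    pvFindC ((l.map (fun p => pvJoin p.1)).foldl min (pvJoin e.1)) d (e :: l)
      = (pvRunB (pvJoin e.1, e) l).2 := by
  induction l with
  | nil => intro e d; simp [pvFindC, pvRunB]
  | cons x rest ih =>
      intro e d
      have hmin := PySem.List.foldl_min_le (rest.map (fun p => pvJoin p.1))
        (min (pvJoin e.1) (pvJoin x.1))
      by_cases hx : pvJoin x.1 < pvJoin e.1
      · have hminx : min (pvJoin e.1) (pvJoin x.1) = pvJoin x.1 := min_eq_right (le_of_lt hx)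
        have hne : pvJoin e.1 ≠ (rest.map (fun p => pvJoin p.1)).foldl min (pvJoin x.1) := by
          intro h
          have := hmin.1
          rw [hminx] at this
          rw [← h] at this
          exact absurd (lt_of_le_of_lt this hx) (lt_irrefl _)
        simp only [pvRunB, if_pos hx, pvFindC, List.map, List.foldl, hminx]
        rw [if_neg (fun h => hne h)]
        exact ih x d
      · have hle : pvJoin e.1 ≤ pvJoin x.1 := not_lt.mp hx
        have hmine : min (pvJoin e.1) (pvJoin x.1) = pvJoin e.1 := min_eq_left hle
        simp only [pvRunB, if_neg hx, pvFindC, List.map, List.foldl, hmine]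
        set m := (rest.map (fun p => pvJoin p.1)).foldl min (pvJoin e.1) with hm
        have hih := ih e d
        rw [← hm] at hih
        have hmle : m ≤ pvJoin e.1 := by rw [hm]; exact (PySem.List.foldl_min_le _ _).1
        by_cases he : pvJoin e.1 = m
        · rw [if_pos he]
          rw [pvFindC, if_pos he] at hih
          exact hih
        · rw [if_neg he]
          have hxm : pvJoin x.1 ≠ m := by
            intro h
            have : pvJoin e.1 ≤ m := le_trans hle (le_of_eq h)
            exact he (le_antisymm this hmle)
          rw [if_neg hxm]
          rw [pvFindC, if_neg he] at hih
          exact hih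

-- B's inner fold, once best_s is some, is pvRunB over the generated (board, id) pairs
theorem pvAltFold (start : Int) :
    ∀ (ks : List Int) (s : String) (bb : List (Option String)) (ii : Int)
      (b : List (Option String)),
    (ks.foldl (pvAltInnerStep start) ((some s, bb, ii), b)).1
      = (some (pvRunB (s, bb, ii) (pvGen start ks b)).1,
         (pvRunB (s, bb, ii) (pvGen start ks b)).2) := by
  intro ks
  induction ks with
  | nil => intros; rfl
  | cons k rest ih =>
      intro s bb ii b
      rw [List.foldl_cons]
      have hsj : pvAltStr = pvJoin := rfl
      by_cases h : pvJoin b < s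
      · rw [show pvAltInnerStep start ((some s, bb, ii), b) k
              = ((some (pvJoin b), b, start + k), pvPermute b pvRotPerm) from by
            simp [pvAltInnerStep, hsj, h]]
        rw [ih]
        simp only [pvGen, pvRunB]
        rw [if_pos h]
      · rw [show pvAltInnerStep start ((some s, bb, ii), b) k
              = ((some s, bb, ii), pvPermute b pvRotPerm) from by
            simp [pvAltInnerStep, hsj, h]]
        rw [ih]
        simp only [pvGen, pvRunB]
        rw [if_neg h]

theorem pvRunB_append (l1 l2 : List (List (Option String) × Int)) :
    ∀ st, pvRunB st (l1 ++ l2) = pvRunB (pvRunB st l1) l2 := by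
  induction l1 with
  | nil => intro st; rfl
  | cons x rest ih => intro st; simp only [List.cons_append, pvRunB, ih]

-- ===== VERDICT (by name: the statement is the Claim_ definition above) =====
set_option maxHeartbeats 2000000 in
theorem get_canonical_form_spec : Claim_equal_get_canonical_form := by
  intro board _ hpre
  show get_canonical_form board = get_canonical_form_alt board
  rcases board with _ | ⟨x0, board⟩
  · exact absurd hpre (by norm_num [Pre_get_canonical_form])
  rcases board with _ | ⟨x1, board⟩
  · exact absurd hpre (by norm_num [Pre_get_canonical_form])
  rcases board with _ | ⟨x2, board⟩
  · exact absurd hpre (by norm_num [Pre_get_canonical_form])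
  rcases board with _ | ⟨x3, board⟩
  · exact absurd hpre (by norm_num [Pre_get_canonical_form])
  rcases board with _ | ⟨x4, board⟩
  · exact absurd hpre (by norm_num [Pre_get_canonical_form])
  rcases board with _ | ⟨x5, board⟩
  · exact absurd hpre (by norm_num [Pre_get_canonical_form])
  rcases board with _ | ⟨x6, board⟩
  · exact absurd hpre (by norm_num [Pre_get_canonical_form])
  rcases board with _ | ⟨x7, board⟩
  · exact absurd hpre (by norm_num [Pre_get_canonical_form])
  rcases board with _ | ⟨x8, board⟩
  · exact absurd hpre (by norm_num [Pre_get_canonical_form])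
  set bd : List (Option String) := x0::x1::x2::x3::x4::x5::x6::x7::x8::board with hbd
  set H : List (Option String) := [x0, x1, x2, x3, x4, x5, x6, x7, x8] with hH
  -- range literals used by the per-board evaluations
  have hr9 : PySem.List.pyRange 0 9 1 = ([0, 1, 2, 3, 4, 5, 6, 7, 8] : List Int) := rfl
  have hr0 : PySem.List.pyRange 0 0 1 = ([] : List Int) := rfl
  have hr1 : PySem.List.pyRange 0 1 1 = ([0] : List Int) := rfl
  have hr2 : PySem.List.pyRange 0 2 1 = ([0, 1] : List Int) := rfl
  have hr3 : PySem.List.pyRange 0 3 1 = ([0, 1, 2] : List Int) := rfl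
  -- each of A's transformed boards IS the corresponding permutation-generated board
  have hE0 : pvTransformBoard bd 0 = H := by
    rw [hbd, hH]
    simp [hr9, hr0, pvTransformBoard, pvTransform,
      PySem.List.pyGet?_of_nonneg, PySem.List.pySetD_of_nonneg,
      PySem.Int.floordiv, PySem.Int.mod]
  have hE1 : pvTransformBoard bd 1 = pvPermute H pvRotPerm := by
    rw [hbd, hH]
    simp [hr9, hr1, pvTransformBoard, pvTransform, pvPermute, pvRotPerm,
      PySem.List.pyGet?_of_nonneg, PySem.List.pyGetD_ofNat', PySem.List.pySetD_of_nonneg,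
      PySem.Int.floordiv, PySem.Int.mod]
  have hE2 : pvTransformBoard bd 2 = pvPermute (pvPermute H pvRotPerm) pvRotPerm := by
    rw [hbd, hH]
    simp [hr9, hr2, pvTransformBoard, pvTransform, pvPermute, pvRotPerm,
      PySem.List.pyGet?_of_nonneg, PySem.List.pyGetD_ofNat', PySem.List.pySetD_of_nonneg,
      PySem.Int.floordiv, PySem.Int.mod]
  have hE3 : pvTransformBoard bd 3
      = pvPermute (pvPermute (pvPermute H pvRotPerm) pvRotPerm) pvRotPerm := by
    rw [hbd, hH]
    simp [hr9, hr3, pvTransformBoard, pvTransform, pvPermute, pvRotPerm,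
      PySem.List.pyGet?_of_nonneg, PySem.List.pyGetD_ofNat', PySem.List.pySetD_of_nonneg,
      PySem.Int.floordiv, PySem.Int.mod]
  have hE4 : pvTransformBoard bd 4 = pvPermute H pvFlipPerm := by
    rw [hbd, hH]
    simp [hr9, hr0, pvTransformBoard, pvTransform, pvPermute, pvFlipPerm,
      PySem.List.pyGet?_of_nonneg, PySem.List.pyGetD_ofNat', PySem.List.pySetD_of_nonneg,
      PySem.Int.floordiv, PySem.Int.mod]
  have hE5 : pvTransformBoard bd 5 = pvPermute (pvPermute H pvFlipPerm) pvRotPerm := by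
    rw [hbd, hH]
    simp [hr9, hr1, pvTransformBoard, pvTransform, pvPermute, pvRotPerm, pvFlipPerm,
      PySem.List.pyGet?_of_nonneg, PySem.List.pyGetD_ofNat', PySem.List.pySetD_of_nonneg,
      PySem.Int.floordiv, PySem.Int.mod]
  have hE6 : pvTransformBoard bd 6
      = pvPermute (pvPermute (pvPermute H pvFlipPerm) pvRotPerm) pvRotPerm := by
    rw [hbd, hH]
    simp [hr9, hr2, pvTransformBoard, pvTransform, pvPermute, pvRotPerm, pvFlipPerm,
      PySem.List.pyGet?_of_nonneg, PySem.List.pyGetD_ofNat', PySem.List.pySetD_of_nonneg,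
      PySem.Int.floordiv, PySem.Int.mod]
  have hE7 : pvTransformBoard bd 7
      = pvPermute (pvPermute (pvPermute (pvPermute H pvFlipPerm) pvRotPerm) pvRotPerm) pvRotPerm := by
    rw [hbd, hH]
    simp [hr9, hr3, pvTransformBoard, pvTransform, pvPermute, pvRotPerm, pvFlipPerm,
      PySem.List.pyGet?_of_nonneg, PySem.List.pyGetD_ofNat', PySem.List.pySetD_of_nonneg,
      PySem.Int.floordiv, PySem.Int.mod]
  -- ---- A side to pvRunB form ----
  have hr8 : PySem.List.pyRange 0 8 1 = ([0, 1, 2, 3, 4, 5, 6, 7] : List Int) := rfl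
  simp only [get_canonical_form,
    PySem.List.foldl_append_singleton_eq_map, List.nil_append, hr8,
    List.map_cons, List.map_nil]
  rw [PySem.List.min?_id_cons, Option.getD_some, pvFindLoop_eq]
  simp only [List.map_cons, List.map_nil]
  have g0 : PySem.List.pyGetD [pvTransformBoard bd 0, pvTransformBoard bd 1, pvTransformBoard bd 2, pvTransformBoard bd 3, pvTransformBoard bd 4, pvTransformBoard bd 5, pvTransformBoard bd 6, pvTransformBoard bd 7] (0 : Int) [] = pvTransformBoard bd 0 := by
    simp [PySem.List.pyGetD_ofNat']
  have g1 : PySem.List.pyGetD [pvTransformBoard bd 0, pvTransformBoard bd 1, pvTransformBoard bd 2, pvTransformBoard bd 3, pvTransformBoard bd 4, pvTransformBoard bd 5, pvTransformBoard bd 6, pvTransformBoard bd 7] (1 : Int) [] = pvTransformBoard bd 1 := by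
    simp [PySem.List.pyGetD_ofNat']
  have g2 : PySem.List.pyGetD [pvTransformBoard bd 0, pvTransformBoard bd 1, pvTransformBoard bd 2, pvTransformBoard bd 3, pvTransformBoard bd 4, pvTransformBoard bd 5, pvTransformBoard bd 6, pvTransformBoard bd 7] (2 : Int) [] = pvTransformBoard bd 2 := by
    simp [PySem.List.pyGetD_ofNat']
  have g3 : PySem.List.pyGetD [pvTransformBoard bd 0, pvTransformBoard bd 1, pvTransformBoard bd 2, pvTransformBoard bd 3, pvTransformBoard bd 4, pvTransformBoard bd 5, pvTransformBoard bd 6, pvTransformBoard bd 7] (3 : Int) [] = pvTransformBoard bd 3 := by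
    simp [PySem.List.pyGetD_ofNat']
  have g4 : PySem.List.pyGetD [pvTransformBoard bd 0, pvTransformBoard bd 1, pvTransformBoard bd 2, pvTransformBoard bd 3, pvTransformBoard bd 4, pvTransformBoard bd 5, pvTransformBoard bd 6, pvTransformBoard bd 7] (4 : Int) [] = pvTransformBoard bd 4 := by
    simp [PySem.List.pyGetD_ofNat']
  have g5 : PySem.List.pyGetD [pvTransformBoard bd 0, pvTransformBoard bd 1, pvTransformBoard bd 2, pvTransformBoard bd 3, pvTransformBoard bd 4, pvTransformBoard bd 5, pvTransformBoard bd 6, pvTransformBoard bd 7] (5 : Int) [] = pvTransformBoard bd 5 := by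
    simp [PySem.List.pyGetD_ofNat']
  have g6 : PySem.List.pyGetD [pvTransformBoard bd 0, pvTransformBoard bd 1, pvTransformBoard bd 2, pvTransformBoard bd 3, pvTransformBoard bd 4, pvTransformBoard bd 5, pvTransformBoard bd 6, pvTransformBoard bd 7] (6 : Int) [] = pvTransformBoard bd 6 := by
    simp [PySem.List.pyGetD_ofNat']
  have g7 : PySem.List.pyGetD [pvTransformBoard bd 0, pvTransformBoard bd 1, pvTransformBoard bd 2, pvTransformBoard bd 3, pvTransformBoard bd 4, pvTransformBoard bd 5, pvTransformBoard bd 6, pvTransformBoard bd 7] (7 : Int) [] = pvTransformBoard bd 7 := by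
    simp [PySem.List.pyGetD_ofNat']
  rw [g0, g1, g2, g3, g4, g5, g6, g7]
  have hmain := pvMain [(pvTransformBoard bd 1, 1), (pvTransformBoard bd 2, 2), (pvTransformBoard bd 3, 3), (pvTransformBoard bd 4, 4), (pvTransformBoard bd 5, 5), (pvTransformBoard bd 6, 6), (pvTransformBoard bd 7, 7)] (pvTransformBoard bd 0, 0) (pvTransformBoard bd 0, 0)
  dsimp only at hmain
  simp only [List.map_cons, List.map_nil] at hmain
  rw [hmain]
  -- ---- B side to pvRunB form ----
  simp only [get_canonical_form_alt]
  have hident : (PySem.List.pyRange 0 9 1).foldl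
      (fun acc i => acc ++ [(PySem.List.pyGet? bd i).getD none]) [] = H := by
    rw [hbd, hH]
    simp [hr9, PySem.List.pyGet?_of_nonneg]
  rw [hident]
  have hstep0 : pvAltInnerStep 0 ((none, [], 0), H) 0
      = ((some (pvAltStr H), H, 0), pvPermute H pvRotPerm) := by
    simp [pvAltInnerStep]
  have hr4 : PySem.List.pyRange 0 4 1 = ([0, 1, 2, 3] : List Int) := rfl
  have hhalf1 : pvAltHalf (none, [], 0) 0 H
      = (some (pvRunB (pvAltStr H, H, 0) (pvGen 0 [1, 2, 3] (pvPermute H pvRotPerm))).1,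
         (pvRunB (pvAltStr H, H, 0) (pvGen 0 [1, 2, 3] (pvPermute H pvRotPerm))).2) := by
    simp only [pvAltHalf, hr4, List.foldl_cons, hstep0]
    exact pvAltFold 0 [1, 2, 3] (pvAltStr H) H 0 (pvPermute H pvRotPerm)
  rw [hhalf1]
  rw [show pvAltHalf
        (some (pvRunB (pvAltStr H, H, 0) (pvGen 0 [1, 2, 3] (pvPermute H pvRotPerm))).1,
         (pvRunB (pvAltStr H, H, 0) (pvGen 0 [1, 2, 3] (pvPermute H pvRotPerm))).2)
        4 (pvPermute H pvFlipPerm)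
      = (some (pvRunB (pvRunB (pvAltStr H, H, 0) (pvGen 0 [1, 2, 3] (pvPermute H pvRotPerm)))
                 (pvGen 4 [0, 1, 2, 3] (pvPermute H pvFlipPerm))).1,
         (pvRunB (pvRunB (pvAltStr H, H, 0) (pvGen 0 [1, 2, 3] (pvPermute H pvRotPerm)))
                 (pvGen 4 [0, 1, 2, 3] (pvPermute H pvFlipPerm))).2) from by
    simp only [pvAltHalf, hr4]
    exact pvAltFold 4 [0, 1, 2, 3] _ _ _ (pvPermute H pvFlipPerm)]
  rw [← pvRunB_append]
  have hgen : pvGen 0 [1, 2, 3] (pvPermute H pvRotPerm)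
        ++ pvGen 4 [0, 1, 2, 3] (pvPermute H pvFlipPerm)
      = [(pvPermute H pvRotPerm, 1),
         (pvPermute (pvPermute H pvRotPerm) pvRotPerm, 2),
         (pvPermute (pvPermute (pvPermute H pvRotPerm) pvRotPerm) pvRotPerm, 3),
         (pvPermute H pvFlipPerm, 4),
         (pvPermute (pvPermute H pvFlipPerm) pvRotPerm, 5),
         (pvPermute (pvPermute (pvPermute H pvFlipPerm) pvRotPerm) pvRotPerm, 6),
         (pvPermute (pvPermute (pvPermute (pvPermute H pvFlipPerm) pvRotPerm) pvRotPerm) pvRotPerm, 7)] := by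
    norm_num [pvGen]
  rw [hgen]
  rw [show pvAltStr H = pvJoin H from rfl]
  rw [hE0, hE1, hE2, hE3, hE4, hE5, hE6, hE7]
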